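-- pv_equiv track=rewrite | github.com/iallabs/wikispecies-crawler | extractor/extractaxomony.py | extract_taxomony
-- ===== SOURCE A (Python) =====
-- def extract_taxomony(ln):
--     final=[]
--     kingdom=[]
--     countwhiteline=0
--     nextisdata = False
--     for line in ln:
--         if line == '\\\n':
--             continue
--
--         if line[0]=='*' and nextisdata == True:
--             kingdom.append(line)
--
--
--         if line[0]=='=' and '1' in line:
--             final.append(kingdom)
--             kingdom=[]
--             kingdom.append(line)
--             nextisdata = True
--             continue
--
--     return final
-- ===== SOURCE B (Python) =====
-- def _split_at_marker(lines):
--     for k, l in enumerate(lines):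
--         if l[0] == '=' and '1' in l:
--             return lines[:k], l, lines[k + 1:]
--     return None
--
--
-- def extract_taxomony(ln):
--     lines = [l for l in ln if l != '\\\n']
--     cut = _split_at_marker(lines)
--     if cut is None:
--         return []
--     final = [[]]
--     _, marker, rest = cut
--     while True:
--         cut = _split_at_marker(rest)
--         if cut is None:
--             return final
--         pre, m2, rest = cut
--         final.append([marker] + [x for x in pre if x[0] == '*'])
--         marker = m2
-- ===== Notes on version B (the rewrite author's own statement) =====
-- stated objective: alternative
-- what changed: A's single stateful fold with a nextisdata flag and a running kingdom accumulator is replaced by a filter pass removing '\ ' lines followed by repeated splitting of the list at marker lines, building each group from the segment between two consecutive markers.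
import Mathlib
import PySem

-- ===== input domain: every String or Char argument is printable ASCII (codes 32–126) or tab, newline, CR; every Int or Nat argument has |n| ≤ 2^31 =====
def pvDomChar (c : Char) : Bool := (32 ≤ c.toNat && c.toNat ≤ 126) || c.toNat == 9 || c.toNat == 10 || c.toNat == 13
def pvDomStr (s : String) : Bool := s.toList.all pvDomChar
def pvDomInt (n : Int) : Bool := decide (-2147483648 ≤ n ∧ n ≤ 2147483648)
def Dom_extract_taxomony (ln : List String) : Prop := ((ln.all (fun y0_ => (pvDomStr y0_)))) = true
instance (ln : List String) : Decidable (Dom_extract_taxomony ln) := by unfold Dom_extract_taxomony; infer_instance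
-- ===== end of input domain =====

-- B replaces A's single stateful fold (flags + running accumulator) by a filter pass plus
-- repeated splitting at marker lines (objective: alternative decomposition, same cost).

-- ===== PORT A =====
-- one loop step of A's for-loop; state = (final, kingdom, nextisdata) (countwhiteline is dead in A)
def stepA (s : List (List String) × List String × Bool) (line : String) :
    List (List String) × List String × Bool :=
  if line = "\\\n" then s
  else
    let kingdom := if (PySem.Str.pyGet? line 0 == some '*') && s.2.2 then s.2.1 ++ [line] else s.2.1
    if (PySem.Str.pyGet? line 0 == some '=') && PySem.Str.isIn "1" line then
      (s.1 ++ [kingdom], [line], true)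
    else (s.1, kingdom, s.2.2)

def extract_taxomony (ln : List String) : List (List String) :=
  (ln.foldl stepA ([], [], false)).1

-- ===== PORT B =====
def isMarkerB (l : String) : Bool :=
  (PySem.Str.pyGet? l 0 == some '=') && PySem.Str.isIn "1" l

def isStarB (l : String) : Bool := PySem.Str.pyGet? l 0 == some '*'

-- _split_at_marker: (lines before first marker, the marker, lines after)
def splitAtMarker : List String → Option (List String × String × List String)
  | [] => none
  | l :: t =>
    if isMarkerB l then some ([], l, t)
    else (splitAtMarker t).map (fun pmr => (l :: pmr.1, pmr.2.1, pmr.2.2))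

theorem splitAtMarker_length : ∀ {rest p : List String} {m : String} {r : List String},
    splitAtMarker rest = some (p, m, r) → r.length < rest.length := by
  intro rest
  induction rest with
  | nil => intro p m r h; simp [splitAtMarker] at h
  | cons l t ih =>
    intro p m r h
    simp only [splitAtMarker] at h
    by_cases hm : isMarkerB l
    · rw [if_pos hm] at h
      simp only [Option.some.injEq, Prod.mk.injEq] at h
      obtain ⟨-, -, h3⟩ := h
      subst h3; simp
    · rw [if_neg hm] at h
      cases ht : splitAtMarker t with
      | none => rw [ht] at h; simp at h
      | some pmr =>
        obtain ⟨p', m', r'⟩ := pmr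
        rw [ht] at h
        simp only [Option.map_some, Option.some.injEq, Prod.mk.injEq] at h
        obtain ⟨-, -, h3⟩ := h
        subst h3
        exact Nat.lt_trans (ih ht) (by simp)

-- B's while loop: one group per pair of consecutive markers
def goB (marker : String) (rest : List String) : List (List String) :=
  match h : splitAtMarker rest with
  | none => []
  | some (pre, m2, rest') =>
    (marker :: pre.filter isStarB) :: goB m2 rest'
termination_by rest.length
decreasing_by exact splitAtMarker_length h

def extract_taxomony_alt (ln : List String) : List (List String) :=
  match splitAtMarker (ln.filter (· != "\\\n")) with
  | none => []
  | some (_, m, rest) => [] :: goB m rest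

-- ===== PRECONDITION & SPEC =====
-- Pre_ excludes exactly the inputs on which Python A raises IndexError: an empty-string line.
def Pre_extract_taxomony (ln : List String) : Prop := ∀ l ∈ ln, l ≠ ""
instance (ln : List String) : Decidable (Pre_extract_taxomony ln) := by
  unfold Pre_extract_taxomony; infer_instance
def pvWitness_extract_taxomony : List String := ["=Regnum1=", "*Animalia", "\\\n", "=2="]

def Spec_extract_taxomony (ln : List String) (out : List (List String)) : Prop := out = extract_taxomony_alt ln
instance (ln : List String) (out : List (List String)) : Decidable (Spec_extract_taxomony ln out) := by unfold Spec_extract_taxomony; infer_instance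

-- ===== CLAIM (what is proved, stated in full; the proofs are below) =====
def Claim_equal_extract_taxomony : Prop := ∀ (ln : List String), Dom_extract_taxomony ln → Pre_extract_taxomony ln → Spec_extract_taxomony ln (extract_taxomony ln)

-- ===== LEMMAS AND PROOFS =====

theorem white_not_marker : isMarkerB "\\\n" = false := by decide

theorem white_not_star : isStarB "\\\n" = false := by decide

theorem marker_not_star {l : String} (h : isMarkerB l = true) : isStarB l = false := by
  rw [isMarkerB, Bool.and_eq_true, beq_iff_eq] at h
  rw [isStarB, h.1]
  decide

theorem stepA_white (s : List (List String) × List String × Bool) : stepA s "\\\n" = s := by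
  rw [stepA, if_pos rfl]

theorem stepA_eq {l : String} (hw : l ≠ "\\\n") (f : List (List String)) (k : List String) (b : Bool) :
    stepA (f, k, b) l =
      (if isMarkerB l then (f ++ [if isStarB l && b then k ++ [l] else k], [l], true)
       else (f, if isStarB l && b then k ++ [l] else k, b)) := by
  rw [stepA, if_neg hw]
  rfl

theorem split_cons_marker {l : String} {t : List String} (h : isMarkerB l = true) :
    splitAtMarker (l :: t) = some ([], l, t) := by
  rw [splitAtMarker, if_pos h]

theorem split_cons_nonmarker {l : String} {t : List String} (h : isMarkerB l = false) :
    splitAtMarker (l :: t) = (splitAtMarker t).map (fun pmr => (l :: pmr.1, pmr.2.1, pmr.2.2)) := by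
  rw [splitAtMarker, if_neg (by simp [h])]

-- proof-side generalisation of goB: the open group may already hold accumulated lines
def goK (kingdom : List String) (rest : List String) : List (List String) :=
  match h : splitAtMarker rest with
  | none => []
  | some (pre, m2, rest') =>
    (kingdom ++ pre.filter isStarB) :: goK [m2] rest'
termination_by rest.length
decreasing_by exact splitAtMarker_length h

theorem goK_none {kingdom rest : List String} (h : splitAtMarker rest = none) :
    goK kingdom rest = [] := by
  rw [goK]
  split
  · rfl
  · rename_i pre m2 rest' h2
    rw [h2] at h
    exact absurd h (by simp)

theorem goK_some {kingdom rest p : List String} {m : String} {r : List String}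
    (h : splitAtMarker rest = some (p, m, r)) :
    goK kingdom rest = (kingdom ++ p.filter isStarB) :: goK [m] r := by
  rw [goK]
  split
  · rename_i h2
    rw [h2] at h
    exact absurd h (by simp)
  · rename_i pre m2 rest' h2
    rw [h2] at h
    simp only [Option.some.injEq, Prod.mk.injEq] at h
    obtain ⟨rfl, rfl, rfl⟩ := h
    rfl

theorem goB_none {m : String} {rest : List String} (h : splitAtMarker rest = none) :
    goB m rest = [] := by
  rw [goB]
  split
  · rfl
  · rename_i pre m2 rest' h2
    rw [h2] at h
    exact absurd h (by simp)

theorem goB_some {m : String} {rest p : List String} {m2 : String} {r : List String}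
    (h : splitAtMarker rest = some (p, m2, r)) :
    goB m rest = (m :: p.filter isStarB) :: goB m2 r := by
  rw [goB]
  split
  · rename_i h2
    rw [h2] at h
    exact absurd h (by simp)
  · rename_i pre m2' rest' h2
    rw [h2] at h
    simp only [Option.some.injEq, Prod.mk.injEq] at h
    obtain ⟨rfl, rfl, rfl⟩ := h
    rfl

theorem goK_eq_goB (m : String) (rest : List String) : goK [m] rest = goB m rest := by
  cases h : splitAtMarker rest with
  | none => rw [goK_none h, goB_none h]
  | some pmr =>
    obtain ⟨pre, m2, r⟩ := pmr
    rw [goK_some h, goB_some h, goK_eq_goB m2 r]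
    rfl
termination_by rest.length
decreasing_by exact splitAtMarker_length h

theorem goK_cons_nonmarker (kingdom : List String) (l : String) (t : List String)
    (h : isMarkerB l = false) :
    goK kingdom (l :: t) =
      goK (kingdom ++ if isStarB l then [l] else []) t := by
  cases ht : splitAtMarker t with
  | none =>
    rw [goK_none ht, goK_none (by rw [split_cons_nonmarker h, ht]; rfl)]
  | some pmr =>
    obtain ⟨p, m, r⟩ := pmr
    rw [goK_some ht,
      goK_some (show splitAtMarker (l :: t) = some (l :: p, m, r) by
        rw [split_cons_nonmarker h, ht]; rfl)]
    rw [List.filter_cons]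
    cases hs : isStarB l <;> simp [List.append_assoc]

-- A's loop after the first marker computes goK of the pending kingdom
theorem foldl_phase2 (rest : List String) :
    ∀ (final : List (List String)) (kingdom : List String),
      (rest.foldl stepA (final, kingdom, true)).1 = final ++ goK kingdom rest := by
  induction rest with
  | nil =>
    intro final kingdom
    rw [goK_none (by rw [splitAtMarker])]
    simp [List.foldl]
  | cons l t ih =>
    intro final kingdom
    rw [List.foldl_cons]
    by_cases hw : l = "\\\n"
    · subst hw
      rw [stepA_white, ih, goK_cons_nonmarker _ _ _ white_not_marker, white_not_star]
      simp
    · rw [stepA_eq hw]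
      cases hm : isMarkerB l with
      | true =>
        rw [if_pos rfl, marker_not_star hm]
        simp only [Bool.false_and, Bool.false_eq_true, if_false]
        rw [ih, goK_some (split_cons_marker hm)]
        simp [List.append_assoc]
      | false =>
        rw [if_neg (by simp), ih, goK_cons_nonmarker _ _ _ hm]
        cases hs : isStarB l <;> simp

-- A's loop before the first marker: stars are ignored, the pending kingdom survives
theorem foldl_phase0 (rest : List String) :
    ∀ (final : List (List String)) (kingdom : List String),
      (rest.foldl stepA (final, kingdom, false)).1 =
        final ++ (match splitAtMarker rest with
          | none => []
          | some (_, m, r) => kingdom :: goK [m] r) := by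
  induction rest with
  | nil => intro final kingdom; simp [splitAtMarker]
  | cons l t ih =>
    intro final kingdom
    rw [List.foldl_cons]
    by_cases hw : l = "\\\n"
    · subst hw
      rw [stepA_white, ih, split_cons_nonmarker white_not_marker]
      cases ht : splitAtMarker t with
      | none => rfl
      | some pmr => obtain ⟨p, m, r⟩ := pmr; rfl
    · rw [stepA_eq hw]
      simp only [Bool.and_false, Bool.false_eq_true, if_false]
      cases hm : isMarkerB l with
      | true =>
        rw [if_pos rfl, foldl_phase2, split_cons_marker hm]
        simp [List.append_assoc]
      | false =>
        rw [if_neg (by simp), ih, split_cons_nonmarker hm]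
        cases ht : splitAtMarker t with
        | none => rfl
        | some pmr => obtain ⟨p, m, r⟩ := pmr; rfl

-- skipping '\\\n' in the fold = folding over the filtered list
theorem foldl_filter_white (ln : List String) :
    ∀ (s : List (List String) × List String × Bool),
      ln.foldl stepA s = (ln.filter (· != "\\\n")).foldl stepA s := by
  induction ln with
  | nil => intro s; rfl
  | cons l t ih =>
    intro s
    by_cases hw : l = "\\\n"
    · subst hw
      rw [List.foldl_cons, stepA_white, List.filter_cons, if_neg (by simp)]
      exact ih s
    · rw [List.foldl_cons, List.filter_cons, if_pos (by simp [hw]), List.foldl_cons]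
      exact ih (stepA s l)

-- ===== VERDICT (by name: the statement is the Claim_ definition above) =====
theorem extract_taxomony_spec : Claim_equal_extract_taxomony := by
  intro ln _ _
  unfold Spec_extract_taxomony extract_taxomony extract_taxomony_alt
  rw [foldl_filter_white, foldl_phase0]
  cases h : splitAtMarker (ln.filter (· != "\\\n")) with
  | none => rfl
  | some pmr =>
    obtain ⟨p, m, r⟩ := pmr
    simp [goK_eq_goB]
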